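-- pv_equiv track=rewrite | github.com/maksim-ganusevich/MOIU | lab11/max_flow.py | mark_f_f
-- ===== SOURCE A (Python) =====
-- def mark_f_f(G_f: dict, start: str, finish: str):
--     Q = [start]
--     l = {start: None}
--     while len(Q) != 0 and finish not in l:
--         cur_v = Q.pop(0)
--         for u in filter(lambda v: v[0] == cur_v, G_f.keys()):
--             if u[1] not in l:
--                 l[u[1]] = u
--                 Q.append(u[1])
--     return l
-- ===== SOURCE B (Python) =====
-- def mark_f_f(G_f: dict, start: str, finish: str):
--     adj = {}
--     for e in G_f.keys():
--         adj.setdefault(e[0], []).append(e)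
--     l = {start: None}
--     Q = [start]
--     i = 0
--     while i < len(Q) and finish not in l:
--         cur = Q[i]
--         i += 1
--         for e in adj.get(cur, ()):
--             if e[1] not in l:
--                 l[e[1]] = e
--                 Q.append(e[1])
--     return l
-- ===== Notes on version B (the rewrite author's own statement) =====
-- stated objective: alternative
-- what changed: B builds an adjacency dictionary from the edge keys once and runs BFS with an index-cursor queue, instead of A's rescan of all of G_f's keys with a filter on every dequeued vertex and O(n) pop(0); asymptotically B avoids the per-vertex edge rescan, but on the benchmark inputs it was not measured faster.
import Mathlib
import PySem

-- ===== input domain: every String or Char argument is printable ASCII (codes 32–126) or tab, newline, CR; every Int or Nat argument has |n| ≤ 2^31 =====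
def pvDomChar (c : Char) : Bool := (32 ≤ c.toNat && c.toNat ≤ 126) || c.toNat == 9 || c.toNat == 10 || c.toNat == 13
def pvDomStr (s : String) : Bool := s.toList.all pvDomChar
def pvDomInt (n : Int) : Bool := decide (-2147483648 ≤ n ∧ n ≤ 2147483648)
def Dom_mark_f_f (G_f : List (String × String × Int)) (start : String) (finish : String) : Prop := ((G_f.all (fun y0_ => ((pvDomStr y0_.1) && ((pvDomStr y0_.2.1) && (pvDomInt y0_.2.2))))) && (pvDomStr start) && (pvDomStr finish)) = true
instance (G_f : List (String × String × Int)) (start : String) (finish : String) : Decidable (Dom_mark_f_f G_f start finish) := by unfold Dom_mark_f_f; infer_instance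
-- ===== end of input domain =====

-- B replaces A's per-vertex filter-rescan of all edge keys by a precomputed adjacency dict and
-- an index-cursor queue (alternative BFS organisation); same return value, same insertion order.

-- ===== PORT A =====
-- inner 'for u in filter(lambda v: v[0] == cur_v, G_f.keys()): …' over the state (Q, l)
def markStepA (G_f : List (String × String × Int)) (cur : String)
    (Ql : List String × PySem.Dict String (Option (String × String))) :
    List String × PySem.Dict String (Option (String × String)) :=
  G_f.foldl (fun acc e =>
    if e.1 == cur then
      if acc.2.contains e.2.1 then acc
      else (acc.1 ++ [e.2.1], acc.2.insert e.2.1 (some (e.1, e.2.1)))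
    else acc) Ql

-- the while loop; fuel G_f.length + 1 bounds the number of pops (each push is a fresh key of l)
def markLoopA (G_f : List (String × String × Int)) (finish : String) :
    Nat → List String → PySem.Dict String (Option (String × String)) →
    PySem.Dict String (Option (String × String))
  | 0, _, l => l
  | _ + 1, [], l => l
  | fuel + 1, cur :: Q, l =>
      if l.contains finish then l
      else
        let s := markStepA G_f cur (Q, l)
        markLoopA G_f finish fuel s.1 s.2

def mark_f_f (G_f : List (String × String × Int)) (start : String) (finish : String) :
    List (String × Option (String × String)) :=
  (markLoopA G_f finish (G_f.length + 1) [start]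
    (PySem.Dict.empty.insert start none)).items

-- ===== PORT B =====
-- adj: one pass over the edge keys, grouping them by source (setdefault/append)
def markAdjB (G_f : List (String × String × Int)) :
    PySem.Dict String (List (String × String)) :=
  G_f.foldl (fun d e => d.modify e.1 [] (fun lst => lst ++ [(e.1, e.2.1)])) PySem.Dict.empty

-- the while loop with an index cursor i into the growing queue Q
def markLoopB (adj : PySem.Dict String (List (String × String))) (finish : String) :
    Nat → List String → Nat → PySem.Dict String (Option (String × String)) →
    PySem.Dict String (Option (String × String))
  | 0, _, _, l => l
  | fuel + 1, Q, i, l =>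
      if i < Q.length ∧ ¬ l.contains finish then
        let cur := Q.getD i ""
        let s := (adj.getD cur []).foldl (fun acc e =>
          if acc.2.contains e.2 then acc
          else (acc.1 ++ [e.2], acc.2.insert e.2 (some e))) (Q, l)
        markLoopB adj finish fuel s.1 (i + 1) s.2
      else l

def mark_f_f_alt (G_f : List (String × String × Int)) (start : String) (finish : String) :
    List (String × Option (String × String)) :=
  (markLoopB (markAdjB G_f) finish (G_f.length + 1) [start] 0
    (PySem.Dict.empty.insert start none)).items

-- ===== PRECONDITION & SPEC =====
def Spec_mark_f_f (G_f : List (String × String × Int)) (start : String) (finish : String) (out : List (String × Option (String × String))) : Prop := out = mark_f_f_alt G_f start finish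
instance (G_f : List (String × String × Int)) (start : String) (finish : String) (out : List (String × Option (String × String))) : Decidable (Spec_mark_f_f G_f start finish out) := by unfold Spec_mark_f_f; infer_instance

-- ===== CLAIM (what is proved, stated in full; the proofs are below) =====
def Claim_equal_mark_f_f : Prop := ∀ (G_f : List (String × String × Int)) (start : String) (finish : String), Dom_mark_f_f G_f start finish → Spec_mark_f_f G_f start finish (mark_f_f G_f start finish)

-- ===== LEMMAS AND PROOFS =====

-- B's adjacency lookup is exactly the filter A runs on every dequeue
theorem adjB_getD (G_f : List (String × String × Int)) (cur : String) :
    (markAdjB G_f).getD cur []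
      = (G_f.filter (fun e => e.1 == cur)).map (fun e => (e.1, e.2.1)) := by
  have h : markAdjB G_f
      = ((G_f.map (fun e => (e.1, (e.1, e.2.1)))).foldl
          (fun d p => d.modify p.1 [] (fun lst => lst ++ [p.2])) PySem.Dict.empty) := by
    rw [List.foldl_map]
    rfl
  rw [h, PySem.Dict.getD_foldl_modify_append]
  simp [List.filter_map, List.map_map, Function.comp_def]

-- the inner fold only reads the dict part of the accumulator; the queue part is appended to
theorem stepB_shift (es : List (String × String)) (q₀ q : List String)
    (l : PySem.Dict String (Option (String × String))) :
    es.foldl (fun acc e =>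
        if acc.2.contains e.2 then acc
        else (acc.1 ++ [e.2], acc.2.insert e.2 (some e))) (q₀ ++ q, l)
      = ((q₀ ++ (es.foldl (fun acc e =>
            if acc.2.contains e.2 then acc
            else (acc.1 ++ [e.2], acc.2.insert e.2 (some e))) (q, l)).1),
         (es.foldl (fun acc e =>
            if acc.2.contains e.2 then acc
            else (acc.1 ++ [e.2], acc.2.insert e.2 (some e))) (q, l)).2) := by
  induction es generalizing q l with
  | nil => simp
  | cons e es ih =>
    by_cases h : l.contains e.2
    · simp only [List.foldl_cons, h, if_true]
      exact ih q l
    · simp only [List.foldl_cons, h, if_false, Bool.false_eq_true, List.append_assoc]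
      exact ih (q ++ [e.2]) (l.insert e.2 (some e))

-- A's guarded scan of all edges equals B's fold over the adjacency list of cur
theorem stepA_eq_stepB (G_f : List (String × String × Int)) (cur : String)
    (q : List String) (l : PySem.Dict String (Option (String × String))) :
    markStepA G_f cur (q, l)
      = ((markAdjB G_f).getD cur []).foldl (fun acc e =>
          if acc.2.contains e.2 then acc
          else (acc.1 ++ [e.2], acc.2.insert e.2 (some e))) (q, l) := by
  rw [adjB_getD, List.foldl_map, List.foldl_filter]
  rfl

-- the two loops agree when A's queue is the un-consumed suffix of B's
theorem loopA_eq_loopB (G_f : List (String × String × Int)) (finish : String)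
    (fuel : Nat) (Q : List String) (i : Nat)
    (l : PySem.Dict String (Option (String × String))) (hi : i ≤ Q.length) :
    markLoopA G_f finish fuel (Q.drop i) l
      = markLoopB (markAdjB G_f) finish fuel Q i l := by
  induction fuel generalizing Q i l with
  | zero => rfl
  | succ fuel ih =>
    cases hQ : Q.drop i with
    | nil =>
      have hlen : Q.length ≤ i := List.drop_eq_nil_iff.mp hQ
      rw [markLoopB, if_neg (fun hcon => absurd hcon.1 (by omega))]
      rfl
    | cons cur rest =>
      have hilt : i < Q.length := by
        by_contra hc
        rw [List.drop_eq_nil_iff.mpr (by omega)] at hQ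
        exact List.cons_ne_nil cur rest hQ.symm
      have hget : Q.getD i "" = cur := by
        have h1 : Q[i]? = some cur := by rw [← List.head?_drop, hQ]; rfl
        simp [List.getD_eq_getElem?_getD, h1]
      by_cases hfin : l.contains finish
      · rw [markLoopB, if_neg (fun hcon => hcon.2 hfin)]
        show (if l.contains finish then l else _) = l
        rw [if_pos hfin]
      · have hQdecomp : Q = (Q.take i ++ [cur]) ++ rest := by
          conv_lhs => rw [← List.take_append_drop i Q, hQ]
          simp
        have hpre : (Q.take i ++ [cur]).length = i + 1 := by
          simp [List.length_take, Nat.min_eq_left (Nat.le_of_lt hilt)]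
        rw [markLoopB, if_pos ⟨hilt, hfin⟩]
        show (if l.contains finish then l
              else markLoopA G_f finish fuel (markStepA G_f cur (rest, l)).1
                     (markStepA G_f cur (rest, l)).2) = _
        rw [if_neg hfin]
        simp only [hget]
        rw [show ((markAdjB G_f).getD cur []).foldl (fun acc e =>
              if acc.2.contains e.2 then acc
              else (acc.1 ++ [e.2], acc.2.insert e.2 (some e))) (Q, l)
            = ((Q.take i ++ [cur]) ++ (markStepA G_f cur (rest, l)).1,
               (markStepA G_f cur (rest, l)).2) from by
          conv_lhs => rw [hQdecomp]
          rw [stepB_shift, stepA_eq_stepB]]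
        rw [← ih ((Q.take i ++ [cur]) ++ (markStepA G_f cur (rest, l)).1) (i + 1) _
            (by simp; omega)]
        congr 1
        rw [← hpre, List.drop_left]

-- ===== VERDICT (by name: the statement is the Claim_ definition above) =====
theorem mark_f_f_spec : Claim_equal_mark_f_f := by
  intro G_f start finish _
  unfold Spec_mark_f_f mark_f_f mark_f_f_alt
  exact congrArg PySem.Dict.items
    (loopA_eq_loopB G_f finish (G_f.length + 1) [start] 0 _ (by simp))
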